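-- pv_equiv track=rewrite | github.com/jjuraska/data2text-nlg | seq2seq/slot_aligner/slot_alignment.py | mergeOrderedDicts
-- ===== SOURCE A (Python) =====
-- from collections import Counter, OrderedDict
--
-- def mergeOrderedDicts(mrs, order=None):
--     if order is None:
--         order = ['da', 'name', 'eattype', 'food', 'pricerange', 'customerrating', 'area', 'familyfriendly', 'near',
--                  'type', 'family', 'hasusbport', 'hdmiport', 'ecorating', 'screensizerange', 'screensize', 'pricerange', 'price', 'audio', 'resolution', 'powerconsumption', 'color', 'accessories', 'count',
--                  'processor', 'memory', 'driverange', 'drive', 'batteryrating', 'battery', 'weightrange', 'weight', 'dimension', 'design', 'utility', 'platform', 'isforbusinesscomputing', 'warranty']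
--     merged_mr = OrderedDict()
--     for slot in order:
--         for mr in mrs:
--             if slot in mr:
--                 merged_mr[slot] = mr[slot]
--                 break
--     return merged_mr
-- ===== SOURCE B (Python) =====
-- from collections import OrderedDict
--
-- def mergeOrderedDicts(mrs, order=None):
--     if order is None:
--         order = ['da', 'name', 'eattype', 'food', 'pricerange', 'customerrating', 'area', 'familyfriendly', 'near',
--                  'type', 'family', 'hasusbport', 'hdmiport', 'ecorating', 'screensizerange', 'screensize', 'pricerange', 'price', 'audio', 'resolution', 'powerconsumption', 'color', 'accessories', 'count',
--                  'processor', 'memory', 'driverange', 'drive', 'batteryrating', 'battery', 'weightrange', 'weight', 'dimension', 'design', 'utility', 'platform', 'isforbusinesscomputing', 'warranty']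
--     first = {}
--     for mr in mrs:
--         for slot, val in mr.items():
--             first.setdefault(slot, val)
--     merged_mr = OrderedDict()
--     for slot in order:
--         if slot in first:
--             merged_mr[slot] = first[slot]
--     return merged_mr
-- ===== Notes on version B (the rewrite author's own statement) =====
-- stated objective: faster
-- what changed: B builds a first-occurrence slot->value map in one pass over mrs and then emits slots in order by direct lookup, instead of A's rescan of all mrs for every slot of order.
import Mathlib
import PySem

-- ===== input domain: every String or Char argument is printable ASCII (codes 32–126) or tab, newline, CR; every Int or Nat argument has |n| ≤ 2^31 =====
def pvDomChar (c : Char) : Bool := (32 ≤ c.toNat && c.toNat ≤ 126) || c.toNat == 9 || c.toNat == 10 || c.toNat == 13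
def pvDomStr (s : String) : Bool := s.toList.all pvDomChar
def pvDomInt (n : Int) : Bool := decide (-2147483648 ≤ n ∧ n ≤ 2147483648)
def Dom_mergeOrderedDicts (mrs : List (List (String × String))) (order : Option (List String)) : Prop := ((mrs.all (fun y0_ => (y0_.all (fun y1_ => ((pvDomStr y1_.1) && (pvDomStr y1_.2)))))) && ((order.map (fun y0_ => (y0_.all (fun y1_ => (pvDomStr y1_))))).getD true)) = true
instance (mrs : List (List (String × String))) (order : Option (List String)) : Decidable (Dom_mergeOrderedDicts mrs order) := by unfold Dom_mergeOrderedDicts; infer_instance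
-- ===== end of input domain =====

-- B replaces A's per-slot rescan of mrs by one first-occurrence map built in a single pass over mrs,
-- then emits the slots in `order` by direct lookup (faster: one pass instead of |order| scans).


def pvDefaultOrder : List String :=
  ["da", "name", "eattype", "food", "pricerange", "customerrating", "area", "familyfriendly", "near",
   "type", "family", "hasusbport", "hdmiport", "ecorating", "screensizerange", "screensize", "pricerange", "price", "audio", "resolution", "powerconsumption", "color", "accessories", "count",
   "processor", "memory", "driverange", "drive", "batteryrating", "battery", "weightrange", "weight", "dimension", "design", "utility", "platform", "isforbusinesscomputing", "warranty"]

-- ===== PORT A =====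
-- 'for mr in mrs: if slot in mr: … break' — first mr containing slot wins
def pvFindFirst (mrs : List (List (String × String))) (slot : String) : Option String :=
  match mrs with
  | [] => none
  | mr :: rest =>
    match (PySem.Dict.mk mr).get? slot with
    | some v => some v
    | none => pvFindFirst rest slot

def mergeOrderedDicts (mrs : List (List (String × String))) (order : Option (List String)) : List (String × String) :=
  let ord := order.getD pvDefaultOrder
  (ord.foldl (fun merged slot =>
      match pvFindFirst mrs slot with
      | some v => merged.insert slot v
      | none => merged)
    (PySem.Dict.empty : PySem.Dict String String)).items

-- ===== PORT B =====
def mergeOrderedDicts_alt (mrs : List (List (String × String))) (order : Option (List String)) : List (String × String) :=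
  let ord := order.getD pvDefaultOrder
  let first := mrs.foldl (fun d mr => mr.foldl (fun d p => d.setdefault p.1 p.2) d)
    (PySem.Dict.empty : PySem.Dict String String)
  (ord.foldl (fun merged slot =>
      match first.get? slot with
      | some v => merged.insert slot v
      | none => merged)
    (PySem.Dict.empty : PySem.Dict String String)).items

-- ===== PRECONDITION & SPEC =====
def Spec_mergeOrderedDicts (mrs : List (List (String × String))) (order : Option (List String)) (out : List (String × String)) : Prop := out = mergeOrderedDicts_alt mrs order
instance (mrs : List (List (String × String))) (order : Option (List String)) (out : List (String × String)) : Decidable (Spec_mergeOrderedDicts mrs order out) := by unfold Spec_mergeOrderedDicts; infer_instance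

-- ===== CLAIM (what is proved, stated in full; the proofs are below) =====
def Claim_equal_mergeOrderedDicts : Prop := ∀ (mrs : List (List (String × String))) (order : Option (List String)), Dom_mergeOrderedDicts mrs order → Spec_mergeOrderedDicts mrs order (mergeOrderedDicts mrs order)

-- ===== LEMMAS AND PROOFS =====

-- lookup after a setdefault: the old binding wins, else the new pair (for this key)
theorem get?_setdefault_or (d : PySem.Dict String String) (a b k : String) :
    (d.setdefault a b).get? k = (d.get? k).or (if k = a then some b else none) := by
  by_cases h : d.contains a
  · rw [PySem.Dict.setdefault_of_contains d b h]
    by_cases hk : k = a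
    · subst hk
      rw [PySem.Dict.contains_eq_isSome_get?] at h
      cases hg : d.get? k <;> simp_all
    · simp [hk]
  · rw [PySem.Dict.setdefault_of_not_contains d b (by simpa using h)]
    by_cases hk : k = a
    · subst hk
      rw [PySem.Dict.contains_eq_isSome_get?] at h
      cases hg : d.get? k <;> simp_all [PySem.Dict.get?_insert_self]
    · rw [PySem.Dict.get?_insert_of_ne d b hk]
      simp [hk]

-- a setdefault pass over one mr: old bindings win, else first match in mr
theorem get?_foldl_setdefault (mr : List (String × String)) (d : PySem.Dict String String) (k : String) :
    ((mr.foldl (fun d p => d.setdefault p.1 p.2) d).get? k)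
      = (d.get? k).or ((PySem.Dict.mk mr).get? k) := by
  induction mr generalizing d with
  | nil =>
    simp only [List.foldl_nil]
    cases d.get? k <;> rfl
  | cons p rest ih =>
    simp only [List.foldl_cons]
    rw [ih, get?_setdefault_or, PySem.Dict.get?_mk_cons, Option.or_assoc]
    congr 1
    by_cases hk : k = p.1
    · subst hk; simp
    · have hbe : (p.1 == k) = false := beq_eq_false_iff_ne.mpr (fun h => hk h.symm)
      rw [if_neg hk, hbe]
      simp

-- the whole first-occurrence map: lookup = A's first-mr scan
theorem get?_firstmap (mrs : List (List (String × String))) (d : PySem.Dict String String) (k : String) :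
    ((mrs.foldl (fun d mr => mr.foldl (fun d p => d.setdefault p.1 p.2) d) d).get? k)
      = (d.get? k).or (pvFindFirst mrs k) := by
  induction mrs generalizing d with
  | nil => simp [pvFindFirst]
  | cons mr rest ih =>
    simp only [List.foldl_cons]
    rw [ih, get?_foldl_setdefault, Option.or_assoc, pvFindFirst]
    cases (PySem.Dict.mk mr).get? k <;> rfl

-- ===== VERDICT (by name: the statement is the Claim_ definition above) =====
theorem mergeOrderedDicts_spec : Claim_equal_mergeOrderedDicts := by
  intro mrs order _
  unfold Spec_mergeOrderedDicts mergeOrderedDicts mergeOrderedDicts_alt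
  have hkey : ∀ k, (mrs.foldl (fun d mr => mr.foldl (fun d p => d.setdefault p.1 p.2) d)
      (PySem.Dict.empty : PySem.Dict String String)).get? k = pvFindFirst mrs k := by
    intro k
    rw [get?_firstmap]
    simp [PySem.Dict.get?_empty]
  have hf : (fun (merged : PySem.Dict String String) slot =>
      match pvFindFirst mrs slot with
      | some v => merged.insert slot v
      | none => merged)
    = (fun (merged : PySem.Dict String String) slot =>
      match (mrs.foldl (fun d mr => mr.foldl (fun d p => d.setdefault p.1 p.2) d)
          (PySem.Dict.empty : PySem.Dict String String)).get? slot with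
      | some v => merged.insert slot v
      | none => merged) := by
    funext d slot
    rw [hkey]
  simp only [hf]
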